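-- pv_equiv track=rewrite | github.com/amit-jain/cogniverse | libs/agents/cogniverse_agents/summarizer_agent.py | _identify_visual_elements
-- ===== SOURCE A (Python) =====
-- from typing import Any, Dict, List, Optional
--
-- def _identify_visual_elements(
--     search_results: List[Dict[str, Any]]
-- ) -> List[str]:
--     """Identify visual elements in search results"""
--     visual_elements = []
--
--     for result in search_results:
--         if "frame_id" in result:
--             visual_elements.append("video_frames")
--         if "thumbnail" in result:
--             visual_elements.append("thumbnails")
--         if "image_path" in result:
--             visual_elements.append("images")
--
--     return list(set(visual_elements))
-- ===== SOURCE B (Python) =====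
-- def _identify_visual_elements(search_results):
--     found = []
--     remaining = [("frame_id", "video_frames"), ("thumbnail", "thumbnails"), ("image_path", "images")]
--     for result in search_results:
--         still = []
--         for key, name in remaining:
--             if key in result:
--                 found.append(name)
--             else:
--                 still.append((key, name))
--         remaining = still
--         if not remaining:
--             break
--     return list(set(found))
-- ===== Notes on version B (the rewrite author's own statement) =====
-- stated objective: alternative
-- what changed: B inverts the accumulation: it carries a shrinking worklist of the not-yet-seen (key, name) pairs, appends each element type only on its first occurrence, and breaks out of the scan as soon as all three types are found, instead of A's append-per-hit pass followed by a final set() dedup.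
import Mathlib
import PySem

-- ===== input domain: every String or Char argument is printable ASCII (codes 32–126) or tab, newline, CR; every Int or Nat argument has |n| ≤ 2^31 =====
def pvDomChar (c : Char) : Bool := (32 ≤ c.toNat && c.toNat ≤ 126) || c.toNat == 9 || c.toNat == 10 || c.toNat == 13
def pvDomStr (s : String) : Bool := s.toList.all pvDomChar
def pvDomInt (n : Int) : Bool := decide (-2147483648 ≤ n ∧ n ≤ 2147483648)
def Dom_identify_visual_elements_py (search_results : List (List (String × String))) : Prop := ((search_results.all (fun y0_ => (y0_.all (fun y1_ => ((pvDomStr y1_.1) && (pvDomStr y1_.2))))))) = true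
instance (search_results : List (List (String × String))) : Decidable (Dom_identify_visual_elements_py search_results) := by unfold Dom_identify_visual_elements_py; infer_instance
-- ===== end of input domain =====

-- B keeps a shrinking list of the not-yet-seen (key, name) pairs and stops scanning once all
-- three are found; the Python result is a list(set(...)) (compared as a set), and the ports
-- realise that set in first-occurrence order, which both algorithms share.

-- ===== PORT A =====
-- for result in search_results: three 'in result' tests appending to visual_elements; then list(set(...))
def identify_visual_elements_py (search_results : List (List (String × String))) : List String :=
  let visual_elements : List String :=
    search_results.foldl (fun acc result =>
      let acc := if (PySem.Dict.mk result).contains "frame_id" then acc ++ ["video_frames"] else acc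
      let acc := if (PySem.Dict.mk result).contains "thumbnail" then acc ++ ["thumbnails"] else acc
      if (PySem.Dict.mk result).contains "image_path" then acc ++ ["images"] else acc) []
  PySem.Set.ofList visual_elements

-- ===== PORT B =====
-- inner pass of B over the still-remaining (key, name) pairs for one result
def pvBInner (result : List (String × String)) (st : List String × List (String × String)) :
    List String × List (String × String) :=
  st.2.foldl (fun (st : List String × List (String × String)) kn =>
    if (PySem.Dict.mk result).contains kn.1 then (st.1 ++ [kn.2], st.2)
    else (st.1, st.2 ++ [kn])) (st.1, [])

-- outer loop of B with the early 'break' when remaining is empty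
def pvBLoop : List (List (String × String)) → List String × List (String × String) → List String
  | [], st => st.1
  | result :: rest, st =>
      let st' := pvBInner result st
      if st'.2 = [] then st'.1 else pvBLoop rest st'

def identify_visual_elements_py_alt (search_results : List (List (String × String))) : List String :=
  PySem.Set.ofList (pvBLoop search_results
    ([], [("frame_id", "video_frames"), ("thumbnail", "thumbnails"), ("image_path", "images")]))

-- ===== PRECONDITION & SPEC =====
def Spec_identify_visual_elements_py (search_results : List (List (String × String))) (out : List String) : Prop := out = identify_visual_elements_py_alt search_results
instance (search_results : List (List (String × String))) (out : List String) : Decidable (Spec_identify_visual_elements_py search_results out) := by unfold Spec_identify_visual_elements_py; infer_instance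

-- ===== CLAIM (what is proved, stated in full; the proofs are below) =====
def Claim_equal_identify_visual_elements_py : Prop := ∀ (search_results : List (List (String × String))), Dom_identify_visual_elements_py search_results → Spec_identify_visual_elements_py search_results (identify_visual_elements_py search_results)

-- ===== LEMMAS AND PROOFS =====

-- the canonical (key, name) table and the per-result hit list
def pvCanon : List (String × String) :=
  [("frame_id", "video_frames"), ("thumbnail", "thumbnails"), ("image_path", "images")]

def pvHits (result : List (String × String)) : List String :=
  (if (PySem.Dict.mk result).contains "frame_id" then ["video_frames"] else []) ++
  (if (PySem.Dict.mk result).contains "thumbnail" then ["thumbnails"] else []) ++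
  (if (PySem.Dict.mk result).contains "image_path" then ["images"] else [])

-- A's accumulation step equals appending pvHits
theorem pvA_step (acc : List String) (result : List (String × String)) :
    (let acc := if (PySem.Dict.mk result).contains "frame_id" then acc ++ ["video_frames"] else acc
     let acc := if (PySem.Dict.mk result).contains "thumbnail" then acc ++ ["thumbnails"] else acc
     if (PySem.Dict.mk result).contains "image_path" then acc ++ ["images"] else acc) =
    acc ++ pvHits result := by
  simp only [pvHits]
  by_cases h1 : (PySem.Dict.mk result).contains "frame_id" <;>
  by_cases h2 : (PySem.Dict.mk result).contains "thumbnail" <;>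
  by_cases h3 : (PySem.Dict.mk result).contains "image_path" <;>
  simp [h1, h2, h3]

-- A as a fold of Set.update
theorem pvFold_append (l : List (List (String × String))) (acc : List String) :
    PySem.Set.ofList (l.foldl (fun acc r => acc ++ pvHits r) acc) =
    l.foldl (fun s r => PySem.Set.update s (pvHits r)) (PySem.Set.ofList acc) := by
  induction l generalizing acc with
  | nil => rfl
  | cons r rest ih =>
      rw [List.foldl_cons, List.foldl_cons, ih, PySem.Set.ofList_append]

theorem pvA_eq_updates (search_results : List (List (String × String))) :
    identify_visual_elements_py search_results =
    search_results.foldl (fun s r => PySem.Set.update s (pvHits r)) [] := by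
  unfold identify_visual_elements_py
  have hstep : (fun (acc : List String) (result : List (String × String)) =>
      (let acc := if (PySem.Dict.mk result).contains "frame_id" then acc ++ ["video_frames"] else acc
       let acc := if (PySem.Dict.mk result).contains "thumbnail" then acc ++ ["thumbnails"] else acc
       if (PySem.Dict.mk result).contains "image_path" then acc ++ ["images"] else acc)) =
      fun acc r => acc ++ pvHits r := by
    funext acc result; exact pvA_step acc result
  rw [hstep, pvFold_append]
  rfl

-- the B invariant: remaining = pvCanon filtered by "name not yet found"
def pvInv (st : List String × List (String × String)) : Prop :=
  st.2 = pvCanon.filter (fun kn => !st.1.contains kn.2)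

-- the inner fold of B, characterised for any test c and remaining list
theorem pvBInner_char (c : String → Bool) (rem : List (String × String))
    (found : List String) (still : List (String × String)) :
    rem.foldl (fun (st : List String × List (String × String)) kn =>
      if c kn.1 then (st.1 ++ [kn.2], st.2)
      else (st.1, st.2 ++ [kn])) (found, still) =
    (found ++ (rem.filter (fun kn => c kn.1)).map Prod.snd,
     still ++ rem.filter (fun kn => !c kn.1)) := by
  induction rem generalizing found still with
  | nil => simp
  | cons kn rest ih =>
      by_cases h : c kn.1 <;> simp [h, ih, List.filter_cons]

-- one B step from an invariant state produces Set.update and preserves the invariant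
set_option maxHeartbeats 1000000 in
theorem pvBInner_spec (result : List (String × String)) (st : List String × List (String × String))
    (h : pvInv st) :
    pvBInner result st = (PySem.Set.update st.1 (pvHits result),
      pvCanon.filter (fun kn => !(PySem.Set.update st.1 (pvHits result)).contains kn.2)) := by
  obtain ⟨found, remaining⟩ := st
  simp only [pvInv] at h
  subst h
  simp only [pvBInner, pvBInner_char (fun k => (PySem.Dict.mk result).contains k),
    pvCanon, pvHits]
  cases hb1 : List.contains found "video_frames" <;>
  cases hb2 : List.contains found "thumbnails" <;>
  cases hb3 : List.contains found "images" <;>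
  (try simp only [hb1, hb2, hb3, List.filter_cons, List.filter_nil, Bool.not_true,
    Bool.not_false, Bool.false_eq_true, eq_self_iff_true, if_true, if_false]) <;>
  simp only [List.contains_eq_mem, decide_eq_false_iff_not, decide_eq_true_eq] at hb1 hb2 hb3 <;>
  cases hc1 : (PySem.Dict.mk result).contains "frame_id" <;>
  cases hc2 : (PySem.Dict.mk result).contains "thumbnail" <;>
  cases hc3 : (PySem.Dict.mk result).contains "image_path" <;>
  (try simp only [hc1, hc2, hc3, List.filter_cons, List.filter_nil, Bool.not_true,
    Bool.not_false, Bool.false_eq_true, eq_self_iff_true, if_true, if_false]) <;>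
  simp [PySem.Set.update, PySem.Set.add_eq_ite, List.contains_eq_mem, hb1, hb2, hb3]

-- once every name is found, further updates by pvHits change nothing
theorem pvUpdate_full (l : List (List (String × String))) (s : List String)
    (h : ("video_frames" : String) ∈ s ∧ ("thumbnails" : String) ∈ s ∧ ("images" : String) ∈ s) :
    l.foldl (fun s r => PySem.Set.update s (pvHits r)) s = s := by
  induction l generalizing s with
  | nil => rfl
  | cons r rest ih =>
      have hupd : PySem.Set.update s (pvHits r) = s := by
        simp only [pvHits]
        by_cases c1 : (PySem.Dict.mk r).contains "frame_id" <;>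
        by_cases c2 : (PySem.Dict.mk r).contains "thumbnail" <;>
        by_cases c3 : (PySem.Dict.mk r).contains "image_path" <;>
        simp [c1, c2, c3, PySem.Set.update, PySem.Set.add_of_mem, h.1, h.2.1, h.2.2]
      simp only [List.foldl_cons, hupd, ih _ h]

-- B's loop computes the same fold of Set.update
theorem pvBLoop_spec (l : List (List (String × String))) (st : List String × List (String × String))
    (h : pvInv st) :
    pvBLoop l st = l.foldl (fun s r => PySem.Set.update s (pvHits r)) st.1 := by
  induction l generalizing st with
  | nil => rfl
  | cons r rest ih =>
      simp only [pvBLoop, pvBInner_spec r st h, List.foldl_cons]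
      split_ifs with he
      · -- remaining empty: every name already found, the rest of the fold is a no-op
        have hall : ∀ kn ∈ pvCanon, kn.2 ∈ PySem.Set.update st.1 (pvHits r) := by
          intro kn hkn
          have := List.filter_eq_nil_iff.mp he kn hkn
          rw [PySem.Set.mem_update, or_iff_not_imp_left]
          simpa [List.contains_eq_mem] using this
        have := pvUpdate_full rest (PySem.Set.update st.1 (pvHits r))
          ⟨hall ("frame_id", "video_frames") (by simp [pvCanon]),
           hall ("thumbnail", "thumbnails") (by simp [pvCanon]),
           hall ("image_path", "images") (by simp [pvCanon])⟩
        exact this.symm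
      · exact ih _ rfl

-- the found list stays duplicate-free, so the final list(set(...)) is the identity
theorem pvNodup_fold (l : List (List (String × String))) (s : List String) (h : s.Nodup) :
    (l.foldl (fun s r => PySem.Set.update s (pvHits r)) s).Nodup := by
  induction l generalizing s with
  | nil => exact h
  | cons r rest ih => exact ih _ (PySem.Set.nodup_update _ _ h)

-- ===== VERDICT (by name: the statement is the Claim_ definition above) =====
theorem identify_visual_elements_py_spec : Claim_equal_identify_visual_elements_py := by
  intro search_results _
  unfold Spec_identify_visual_elements_py identify_visual_elements_py_alt
  rw [pvBLoop_spec _ _ (by simp [pvInv, pvCanon, List.filter]), pvA_eq_updates]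
  exact (PySem.Set.ofList_eq_self_of_nodup _ (pvNodup_fold _ _ List.nodup_nil)).symm
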